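-- pv_equiv track=rewrite | github.com/FalseNegativeLab/mlscorecheck | mlscorecheck/aggregated/_folding_utils.py | determine_fold_configurations
-- ===== SOURCE A (Python) =====
-- def stratified_configurations_sklearn(p: int,
--                                         n: int,
--                                         n_splits: int) -> list:
--     """
--     The sklearn stratification strategy
--
--     Args:
--         p (int): number of positives
--         n (int): number of negatives
--         n_splits (int): the number of splits
--
--     Returns:
--         list(tuple): the list of the structure of the folds
--     """
--     p_base, p_remainder = divmod(p, n_splits)
--     n_base, n_remainder = divmod(n, n_splits)
--
--     results = [(n_base, p_base)] * n_splits
--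
--     idx = 0
--     while n_remainder > 0:
--         results[idx] = (results[idx][0] + 1, results[idx][1])
--         n_remainder -= 1
--         idx += 1
--         idx %= n_splits
--     while p_remainder > 0:
--         results[idx] = (results[idx][0], results[idx][1] + 1)
--         p_remainder -= 1
--         idx += 1
--         idx %= n_splits
--
--     return results
--
-- def determine_fold_configurations(p: int,
--                                     n: int,
--                                     n_folds: int,
--                                     n_repeats: int,
--                                     folding: str = 'stratified_sklearn') -> list:
--     """
--     Determine fold configurations according to a folding
--
--     Args:
--         p (int): the number of positives
--         n (int): the number of negatives
--         n_folds (int): the number of folds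
--         n_repeats (int): the number of repeats
--         folding (str): 'stratified_sklearn' - the folding strategy
--
--     Returns:
--         list(dict): the list of folds
--
--     Raises:
--         ValueError: if the folding is not supported
--     """
--     if folding != 'stratified_sklearn':
--         raise ValueError(f'folding strategy {folding} is not supported yet')
--
--     configurations = stratified_configurations_sklearn(p=p, n=n, n_splits=n_folds)
--     configurations = [{'n': conf[0], 'p': conf[1]} for conf in configurations]
--     return [{**item} for item in configurations for _ in range(n_repeats)]
-- ===== SOURCE B (Python) =====
-- def determine_fold_configurations(p: int,
--                                     n: int,
--                                     n_folds: int,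
--                                     n_repeats: int,
--                                     folding: str = 'stratified_sklearn') -> list:
--     """
--     Determine fold configurations according to a folding (closed-form variant).
--
--     Each fold's counts are computed directly: the n remainder goes to the first
--     n % n_folds folds; the p remainder is distributed starting right after them,
--     wrapping around modulo n_folds.
--     """
--     if folding != 'stratified_sklearn':
--         raise ValueError(f'folding strategy {folding} is not supported yet')
--
--     n_base, n_rem = divmod(n, n_folds)
--     p_base, p_rem = divmod(p, n_folds)
--     folds = [{'n': n_base + (1 if i < n_rem else 0),
--               'p': p_base + (1 if (i - n_rem) % n_folds < p_rem else 0)}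
--              for i in range(n_folds)]
--     return [dict(fold) for fold in folds for _ in range(n_repeats)]
-- ===== Notes on version B (the rewrite author's own statement) =====
-- stated objective: simpler
-- what changed: The two rotating while-loops that distribute the n and p remainders are replaced by a closed-form comprehension computing each fold's counts directly from divmod results (the p remainder starts at index n%n_folds and wraps modulo n_folds).
import Mathlib
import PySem

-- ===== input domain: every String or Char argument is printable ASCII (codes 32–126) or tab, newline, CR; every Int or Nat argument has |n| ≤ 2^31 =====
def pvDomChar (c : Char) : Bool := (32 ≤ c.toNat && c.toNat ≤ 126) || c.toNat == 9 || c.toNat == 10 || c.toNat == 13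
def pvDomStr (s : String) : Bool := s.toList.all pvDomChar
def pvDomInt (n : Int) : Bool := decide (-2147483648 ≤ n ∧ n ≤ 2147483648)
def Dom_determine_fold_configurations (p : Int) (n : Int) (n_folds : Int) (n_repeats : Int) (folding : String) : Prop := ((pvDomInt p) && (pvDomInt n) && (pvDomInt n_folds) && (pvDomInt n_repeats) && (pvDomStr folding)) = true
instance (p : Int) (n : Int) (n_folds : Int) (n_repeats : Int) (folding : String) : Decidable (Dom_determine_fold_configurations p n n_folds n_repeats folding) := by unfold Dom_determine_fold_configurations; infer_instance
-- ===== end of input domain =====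

-- B replaces A's two rotating remainder-distribution while-loops by a closed-form
-- per-fold arithmetic comprehension (objective: simpler); same return value on Pre_.

-- ===== PORT A =====
-- first while-loop of stratified_configurations_sklearn: distributes the n remainder.
-- results[idx] is accessed via .toNat/getD: whenever the loop body runs in Python,
-- 0 ≤ idx < len(results), so this is exact on every reachable state.
def pvNLoop (results : List (Int × Int)) (rem : Int) (idx : Int) (ns : Int) : List (Int × Int) × Int :=
  if 0 < rem then
    pvNLoop (results.set idx.toNat
        ((results.getD idx.toNat (0, 0)).1 + 1, (results.getD idx.toNat (0, 0)).2))
      (rem - 1) (PySem.Int.mod (idx + 1) ns) ns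
  else (results, idx)
termination_by rem.toNat
decreasing_by omega

-- second while-loop: distributes the p remainder, continuing from the same idx.
def pvPLoop (results : List (Int × Int)) (rem : Int) (idx : Int) (ns : Int) : List (Int × Int) × Int :=
  if 0 < rem then
    pvPLoop (results.set idx.toNat
        ((results.getD idx.toNat (0, 0)).1, (results.getD idx.toNat (0, 0)).2 + 1))
      (rem - 1) (PySem.Int.mod (idx + 1) ns) ns
  else (results, idx)
termination_by rem.toNat
decreasing_by omega

def stratified_configurations_sklearn (p : Int) (n : Int) (n_splits : Int) : List (Int × Int) :=
  let p_base := PySem.Int.floordiv p n_splits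
  let p_remainder := PySem.Int.mod p n_splits
  let n_base := PySem.Int.floordiv n n_splits
  let n_remainder := PySem.Int.mod n n_splits
  let results := List.replicate n_splits.toNat (n_base, p_base)
  let r1 := pvNLoop results n_remainder 0 n_splits
  (pvPLoop r1.1 p_remainder r1.2 n_splits).1

def determine_fold_configurations (p : Int) (n : Int) (n_folds : Int) (n_repeats : Int) (folding : String) : List (List (String × Int)) :=
  if folding ≠ "stratified_sklearn" then []  -- Python raises ValueError here: outside Pre_
  else
    let configurations := (stratified_configurations_sklearn p n n_folds).map
      (fun conf => [("n", conf.1), ("p", conf.2)])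
    configurations.flatMap (fun item => (PySem.List.pyRange 0 n_repeats 1).map (fun _ => item))

-- ===== PORT B =====
def determine_fold_configurations_alt (p : Int) (n : Int) (n_folds : Int) (n_repeats : Int) (folding : String) : List (List (String × Int)) :=
  if folding ≠ "stratified_sklearn" then []  -- Python raises ValueError here: outside Pre_
  else
    let n_base := PySem.Int.floordiv n n_folds
    let n_rem := PySem.Int.mod n n_folds
    let p_base := PySem.Int.floordiv p n_folds
    let p_rem := PySem.Int.mod p n_folds
    let folds := (PySem.List.pyRange 0 n_folds 1).map (fun i =>
      [("n", n_base + (if i < n_rem then 1 else 0)),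
       ("p", p_base + (if PySem.Int.mod (i - n_rem) n_folds < p_rem then 1 else 0))])
    folds.flatMap (fun fold => (PySem.List.pyRange 0 n_repeats 1).map (fun _ => fold))

-- ===== PRECONDITION & SPEC =====
-- Pre_ excludes exactly the inputs where Python A raises: an unsupported folding string
-- (ValueError) and n_folds = 0 (ZeroDivisionError in divmod).
def Pre_determine_fold_configurations (p : Int) (n : Int) (n_folds : Int) (n_repeats : Int) (folding : String) : Prop :=
  folding = "stratified_sklearn" ∧ n_folds ≠ 0
instance (p : Int) (n : Int) (n_folds : Int) (n_repeats : Int) (folding : String) : Decidable (Pre_determine_fold_configurations p n n_folds n_repeats folding) := by unfold Pre_determine_fold_configurations; infer_instance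

def pvWitness_determine_fold_configurations : Int × Int × Int × Int × String := (5, 10, 3, 2, "stratified_sklearn")

def Spec_determine_fold_configurations (p : Int) (n : Int) (n_folds : Int) (n_repeats : Int) (folding : String) (out : List (List (String × Int))) : Prop := out = determine_fold_configurations_alt p n n_folds n_repeats folding
instance (p : Int) (n : Int) (n_folds : Int) (n_repeats : Int) (folding : String) (out : List (List (String × Int))) : Decidable (Spec_determine_fold_configurations p n n_folds n_repeats folding out) := by unfold Spec_determine_fold_configurations; infer_instance

-- ===== CLAIM (what is proved, stated in full; the proofs are below) =====
def Claim_equal_determine_fold_configurations : Prop := ∀ (p : Int) (n : Int) (n_folds : Int) (n_repeats : Int) (folding : String), Dom_determine_fold_configurations p n n_folds n_repeats folding → Pre_determine_fold_configurations p n n_folds n_repeats folding → Spec_determine_fold_configurations p n n_folds n_repeats folding (determine_fold_configurations p n n_folds n_repeats folding)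

-- ===== LEMMAS AND PROOFS =====

lemma pvSetAppend {α : Type} (A t : List α) (x y : α) :
    (A ++ x :: t).set A.length y = A ++ y :: t := by
  induction A with
  | nil => rfl
  | cons a A ih => simp [ih]

-- running the n-loop through a block of r equal entries that ends strictly before ns
lemma pvNLoop_run (r : Nat) : ∀ (A B : List (Int × Int)) (x : Int × Int) (s ns : Int),
    0 ≤ s → (A.length + r : Int) < ns →
    pvNLoop (A ++ List.replicate r x ++ B) ((r : Int) + s) (A.length : Int) ns =
      pvNLoop (A ++ List.replicate r (x.1 + 1, x.2) ++ B) s ((A.length : Int) + r) ns := by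
  induction r with
  | zero => intro A B x s ns hs h; simp
  | succ r ih =>
    intro A B x s ns hs h
    have hns : (0:Int) < ns := by omega
    have hsplit : A ++ List.replicate (r+1) x ++ B = A ++ x :: (List.replicate r x ++ B) := by
      simp [List.replicate_succ]
    rw [pvNLoop, if_pos (by push_cast; omega), hsplit, Int.toNat_natCast]
    have hget : (A ++ x :: (List.replicate r x ++ B)).getD A.length (0,0) = x := by
      simp [List.getD_eq_getElem?_getD]
    rw [hget, pvSetAppend]
    have hmod : PySem.Int.mod ((A.length : Int) + 1) ns = (((A ++ [(x.1 + 1, x.2)]).length : Int)) := by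
      rw [PySem.Int.mod_eq_emod_of_pos hns, Int.emod_eq_of_lt (by omega) (by omega)]
      simp
    have hrem : ((r+1 : Nat) : Int) + s - 1 = (r : Int) + s := by push_cast; omega
    have hlist : A ++ (x.1 + 1, x.2) :: (List.replicate r x ++ B)
        = (A ++ [(x.1 + 1, x.2)]) ++ List.replicate r x ++ B := by simp
    rw [hmod, hrem, hlist]
    rw [ih (A ++ [(x.1 + 1, x.2)]) B x s ns hs (by simp; omega)]
    have hlist2 : (A ++ [(x.1 + 1, x.2)]) ++ List.replicate r (x.1 + 1, x.2) ++ B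
        = A ++ List.replicate (r+1) (x.1 + 1, x.2) ++ B := by simp [List.replicate_succ]
    rw [hlist2]
    congr 1
    simp; omega

-- running the p-loop through a block of r equal entries that ends strictly before ns
lemma pvPLoop_run (r : Nat) : ∀ (A B : List (Int × Int)) (x : Int × Int) (s ns : Int),
    0 ≤ s → (A.length + r : Int) < ns →
    pvPLoop (A ++ List.replicate r x ++ B) ((r : Int) + s) (A.length : Int) ns =
      pvPLoop (A ++ List.replicate r (x.1, x.2 + 1) ++ B) s ((A.length : Int) + r) ns := by
  induction r with
  | zero => intro A B x s ns hs h; simp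
  | succ r ih =>
    intro A B x s ns hs h
    have hns : (0:Int) < ns := by omega
    have hsplit : A ++ List.replicate (r+1) x ++ B = A ++ x :: (List.replicate r x ++ B) := by
      simp [List.replicate_succ]
    rw [pvPLoop, if_pos (by push_cast; omega), hsplit, Int.toNat_natCast]
    have hget : (A ++ x :: (List.replicate r x ++ B)).getD A.length (0,0) = x := by
      simp [List.getD_eq_getElem?_getD]
    rw [hget, pvSetAppend]
    have hmod : PySem.Int.mod ((A.length : Int) + 1) ns = (((A ++ [(x.1, x.2 + 1)]).length : Int)) := by
      rw [PySem.Int.mod_eq_emod_of_pos hns, Int.emod_eq_of_lt (by omega) (by omega)]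
      simp
    have hrem : ((r+1 : Nat) : Int) + s - 1 = (r : Int) + s := by push_cast; omega
    have hlist : A ++ (x.1, x.2 + 1) :: (List.replicate r x ++ B)
        = (A ++ [(x.1, x.2 + 1)]) ++ List.replicate r x ++ B := by simp
    rw [hmod, hrem, hlist]
    rw [ih (A ++ [(x.1, x.2 + 1)]) B x s ns hs (by simp; omega)]
    have hlist2 : (A ++ [(x.1, x.2 + 1)]) ++ List.replicate r (x.1, x.2 + 1) ++ B
        = A ++ List.replicate (r+1) (x.1, x.2 + 1) ++ B := by simp [List.replicate_succ]
    rw [hlist2]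
    congr 1
    simp; omega

-- running the p-loop through a block that ends exactly at ns: the index wraps to 0
lemma pvPLoop_wrap (r : Nat) (A : List (Int × Int)) (x : Int × Int) (s ns : Int)
    (hs : 0 ≤ s) (hr : 1 ≤ r) (hend : (A.length + r : Int) = ns) :
    pvPLoop (A ++ List.replicate r x) ((r : Int) + s) (A.length : Int) ns =
      pvPLoop (A ++ List.replicate r (x.1, x.2 + 1)) s 0 ns := by
  obtain ⟨r', rfl⟩ : ∃ r', r = r' + 1 := ⟨r - 1, by omega⟩
  have hns : (0:Int) < ns := by omega
  have h1 : A ++ List.replicate (r'+1) x = A ++ List.replicate r' x ++ [x] := by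
    rw [List.replicate_succ']; simp
  have h2 : ((r'+1 : Nat) : Int) + s = (r' : Int) + (1 + s) := by push_cast; ring
  rw [h1, h2, pvPLoop_run r' A [x] x (1+s) ns (by omega) (by omega)]
  set C := A ++ List.replicate r' (x.1, x.2 + 1) with hC
  have hlenC : (C.length : Int) = (A.length : Int) + r' := by simp [hC]
  rw [pvPLoop, if_pos (by omega)]
  have hidx : ((A.length : Int) + r').toNat = C.length := by omega
  have hget : (C ++ [x]).getD C.length (0,0) = x := by
    simp [List.getD_eq_getElem?_getD]
  have hsetx : (C ++ [x]).set C.length (x.1, x.2 + 1) = C ++ [(x.1, x.2 + 1)] := pvSetAppend C [] x _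
  rw [hidx, hget, hsetx]
  have hmod0 : PySem.Int.mod ((A.length : Int) + r' + 1) ns = 0 := by
    rw [PySem.Int.mod_eq_emod_of_pos hns]
    have : (A.length : Int) + r' + 1 = ns := by push_cast at hend; omega
    rw [this, Int.emod_self]
  have hrem : 1 + s - 1 = s := by ring
  rw [hmod0, hrem]
  congr 1
  rw [hC, List.replicate_succ']
  simp

lemma map_pyRange_const {α : Type} (a b : Int) (f : Int → α) (c : α)
    (h : ∀ i, a ≤ i → i < b → f i = c) :
    (PySem.List.pyRange a b 1).map f = List.replicate (b - a).toNat c := by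
  rw [PySem.List.pyRange_one, List.map_map, List.eq_replicate_iff]
  refine ⟨by simp, ?_⟩
  intro y hy
  rcases List.mem_map.mp hy with ⟨k, hk, rfl⟩
  have hk' : (k : Int) < b - a := by
    have := List.mem_range.mp hk
    omega
  exact h (a + k) (by omega) (by omega)

lemma strat_eq (p n ns : Int) (hns : ns ≠ 0) :
    stratified_configurations_sklearn p n ns =
      (PySem.List.pyRange 0 ns 1).map (fun i =>
        (PySem.Int.floordiv n ns + (if i < PySem.Int.mod n ns then 1 else 0),
         PySem.Int.floordiv p ns + (if PySem.Int.mod (i - PySem.Int.mod n ns) ns < PySem.Int.mod p ns then 1 else 0))) := by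
  simp only [stratified_configurations_sklearn]
  set nb := PySem.Int.floordiv n ns
  set pb := PySem.Int.floordiv p ns
  set nr := PySem.Int.mod n ns with hnr
  set pr := PySem.Int.mod p ns with hpr
  rcases lt_or_gt_of_ne hns with hneg | hpos
  · -- ns < 0: the list is empty and both remainders are ≤ 0, so the loops do nothing
    have h0 : ns.toNat = 0 := by omega
    have hn := (PySem.Int.mod_neg_bounds n hneg).2
    have hp := (PySem.Int.mod_neg_bounds p hneg).2
    rw [h0, PySem.List.pyRange_one_eq_nil (by omega)]
    have hN : pvNLoop (List.replicate 0 ((nb : Int), pb)) nr 0 ns = ([], 0) := by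
      rw [pvNLoop, if_neg (by rw [hnr]; omega)]; rfl
    rw [hN]
    rw [pvPLoop, if_neg (by rw [hpr]; omega)]
    simp
  · -- ns > 0
    have hnr0 : 0 ≤ nr := by rw [hnr]; exact PySem.Int.mod_nonneg n hpos
    have hnr1 : nr < ns := by rw [hnr]; exact PySem.Int.mod_lt n hpos
    have hpr0 : 0 ≤ pr := by rw [hpr]; exact PySem.Int.mod_nonneg p hpos
    have hpr1 : pr < ns := by rw [hpr]; exact PySem.Int.mod_lt p hpos
    clear_value nb pb nr pr
    clear hnr hpr
    -- the n loop: the first nr entries get their first component incremented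
    have hNs : pvNLoop (List.replicate ns.toNat (nb, pb)) nr 0 ns
        = (List.replicate nr.toNat (nb + 1, pb) ++ List.replicate (ns.toNat - nr.toNat) (nb, pb), nr) := by
      have hsplit : List.replicate ns.toNat (nb, pb)
          = ([] : List (Int × Int)) ++ List.replicate nr.toNat (nb, pb) ++ List.replicate (ns.toNat - nr.toNat) (nb, pb) := by
        rw [List.nil_append, ← List.replicate_add]
        congr 1; omega
      have h := pvNLoop_run nr.toNat [] (List.replicate (ns.toNat - nr.toNat) (nb, pb)) (nb, pb) 0 ns
        (le_refl 0) (by simp only [List.length_nil]; omega)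
      simp only [List.length_nil, Nat.cast_zero, add_zero, zero_add] at h
      rw [Int.toNat_of_nonneg hnr0] at h
      rw [hsplit, h, pvNLoop, if_neg (by omega)]
      simp
    rw [hNs]
    by_cases hc : nr + pr ≤ ns
    · -- the p increments do not wrap (they may end exactly at index ns - 1)
      have hfinal : (pvPLoop (List.replicate nr.toNat ((nb : Int) + 1, pb) ++ List.replicate (ns.toNat - nr.toNat) (nb, pb)) pr nr ns).1
          = List.replicate nr.toNat (nb + 1, pb) ++ List.replicate pr.toNat (nb, pb + 1)
              ++ List.replicate (ns.toNat - nr.toNat - pr.toNat) (nb, pb) := by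
        by_cases heq : nr + pr = ns
        · -- they end exactly at the last index: wrap lemma with s = 0
          have hD : List.replicate (ns.toNat - nr.toNat) ((nb : Int), pb) = List.replicate pr.toNat (nb, pb) := by
            congr 1; omega
          have h := pvPLoop_wrap pr.toNat (List.replicate nr.toNat ((nb : Int) + 1, pb)) (nb, pb) 0 ns
            (le_refl 0) (by omega) (by simp only [List.length_replicate]; omega)
          simp only [List.length_replicate] at h
          rw [Int.toNat_of_nonneg hpr0, add_zero] at h
          rw [Int.toNat_of_nonneg hnr0] at h
          rw [hD, h, pvPLoop, if_neg (by omega)]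
          have h3 : ns.toNat - nr.toNat - pr.toNat = 0 := by omega
          simp [h3]
        · -- they stay strictly inside: one straight run
          have hD : List.replicate (ns.toNat - nr.toNat) ((nb : Int), pb)
              = List.replicate pr.toNat (nb, pb) ++ List.replicate (ns.toNat - nr.toNat - pr.toNat) (nb, pb) := by
            rw [← List.replicate_add]; congr 1; omega
          have h := pvPLoop_run pr.toNat (List.replicate nr.toNat ((nb : Int) + 1, pb))
            (List.replicate (ns.toNat - nr.toNat - pr.toNat) (nb, pb)) (nb, pb) 0 ns
            (le_refl 0) (by simp only [List.length_replicate]; omega)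
          simp only [List.length_replicate] at h
          rw [Int.toNat_of_nonneg hpr0, add_zero] at h
          rw [Int.toNat_of_nonneg hnr0] at h
          rw [hD, ← List.append_assoc, h, pvPLoop, if_neg (by omega)]
      rw [hfinal]
      -- now the closed form: split the range at nr and nr + pr
      rw [PySem.List.pyRange_one_append 0 nr ns hnr0 (by omega),
          PySem.List.pyRange_one_append nr (nr + pr) ns (by omega) (by omega),
          List.map_append, List.map_append, ← List.append_assoc]
      congr 1
      · congr 1
        · rw [map_pyRange_const _ _ _ ((nb : Int) + 1, pb)
            (fun i hi1 hi2 => by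
              have hm : PySem.Int.mod (i - nr) ns = i - nr + ns := by
                rw [PySem.Int.mod_eq_emod_of_pos hpos, Int.emod_eq_add_self_emod,
                  Int.emod_eq_of_lt (by omega) (by omega)]
              rw [hm, if_pos (show i < nr by omega),
                if_neg (show ¬ i - nr + ns < pr by omega)]
              simp)]
          congr 1; omega
        · rw [map_pyRange_const _ _ _ ((nb : Int), pb + 1)
            (fun i hi1 hi2 => by
              have hm : PySem.Int.mod (i - nr) ns = i - nr := by
                rw [PySem.Int.mod_eq_emod_of_pos hpos, Int.emod_eq_of_lt (by omega) (by omega)]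
              rw [hm, if_neg (show ¬ i < nr by omega),
                if_pos (show i - nr < pr by omega)]
              simp)]
          congr 1; omega
      · rw [map_pyRange_const _ _ _ ((nb : Int), pb)
          (fun i hi1 hi2 => by
            have hm : PySem.Int.mod (i - nr) ns = i - nr := by
              rw [PySem.Int.mod_eq_emod_of_pos hpos, Int.emod_eq_of_lt (by omega) (by omega)]
            rw [hm, if_neg (show ¬ i < nr by omega),
              if_neg (show ¬ i - nr < pr by omega)]
            simp)]
        congr 1; omega
    · -- the p increments wrap: nr + pr - ns of them land on the first indices
      have hwrap : 1 ≤ ns.toNat - nr.toNat := by omega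
      have hs0 : (0 : Int) ≤ nr + pr - ns := by omega
      have h1 := pvPLoop_wrap (ns.toNat - nr.toNat) (List.replicate nr.toNat ((nb : Int) + 1, pb)) (nb, pb)
        (nr + pr - ns) ns hs0 hwrap (by simp only [List.length_replicate]; omega)
      simp only [List.length_replicate] at h1
      rw [Int.toNat_of_nonneg hnr0] at h1
      have e1 : ((ns.toNat - nr.toNat : Nat) : Int) + (nr + pr - ns) = pr := by omega
      rw [e1] at h1
      rw [h1]
      have hA : List.replicate nr.toNat ((nb : Int) + 1, pb)
          = List.replicate (nr + pr - ns).toNat (nb + 1, pb)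
            ++ List.replicate (nr.toNat - (nr + pr - ns).toNat) (nb + 1, pb) := by
        rw [← List.replicate_add]; congr 1; omega
      have h2 := pvPLoop_run (nr + pr - ns).toNat []
        (List.replicate (nr.toNat - (nr + pr - ns).toNat) ((nb : Int) + 1, pb)
          ++ List.replicate (ns.toNat - nr.toNat) (nb, pb + 1)) (nb + 1, pb) 0 ns
        (le_refl 0) (by simp only [List.length_nil]; omega)
      simp only [List.length_nil, Nat.cast_zero, add_zero, zero_add, List.nil_append] at h2
      rw [Int.toNat_of_nonneg hs0] at h2
      rw [hA, List.append_assoc, h2, pvPLoop, if_neg (by omega), ← List.append_assoc]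
      dsimp only
      -- closed form: split the range at nr + pr - ns and at nr
      rw [PySem.List.pyRange_one_append 0 (nr + pr - ns) ns hs0 (by omega),
          PySem.List.pyRange_one_append (nr + pr - ns) nr ns (by omega) (by omega),
          List.map_append, List.map_append, ← List.append_assoc]
      congr 1
      · congr 1
        · rw [map_pyRange_const _ _ _ ((nb : Int) + 1, pb + 1)
            (fun i hi1 hi2 => by
              have hm : PySem.Int.mod (i - nr) ns = i - nr + ns := by
                rw [PySem.Int.mod_eq_emod_of_pos hpos, Int.emod_eq_add_self_emod,
                  Int.emod_eq_of_lt (by omega) (by omega)]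
              rw [hm, if_pos (show i < nr by omega),
                if_pos (show i - nr + ns < pr by omega)])]
          congr 1; omega
        · rw [map_pyRange_const _ _ _ ((nb : Int) + 1, pb)
            (fun i hi1 hi2 => by
              have hm : PySem.Int.mod (i - nr) ns = i - nr + ns := by
                rw [PySem.Int.mod_eq_emod_of_pos hpos, Int.emod_eq_add_self_emod,
                  Int.emod_eq_of_lt (by omega) (by omega)]
              rw [hm, if_pos (show i < nr by omega),
                if_neg (show ¬ i - nr + ns < pr by omega)]
              simp)]
          congr 1; omega
      · rw [map_pyRange_const _ _ _ ((nb : Int), pb + 1)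
          (fun i hi1 hi2 => by
            have hm : PySem.Int.mod (i - nr) ns = i - nr := by
              rw [PySem.Int.mod_eq_emod_of_pos hpos, Int.emod_eq_of_lt (by omega) (by omega)]
            rw [hm, if_neg (show ¬ i < nr by omega),
              if_pos (show i - nr < pr by omega)]
            simp)]
        congr 1; omega

-- ===== VERDICT (by name: the statement is the Claim_ definition above) =====
theorem determine_fold_configurations_spec : Claim_equal_determine_fold_configurations := by
  intro p n n_folds n_repeats folding _ hpre
  obtain ⟨hf, hnf⟩ := hpre
  unfold Spec_determine_fold_configurations
  subst hf
  simp only [determine_fold_configurations, determine_fold_configurations_alt]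
  rw [if_neg (fun h => h rfl), if_neg (fun h => h rfl)]
  rw [strat_eq p n n_folds hnf, List.map_map]
  rfl
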